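-- pv_equiv track=rewrite | github.com/slynnykusbk-glitch/contract_ai | contract_review_app/gpt/gpt_proxy_api.py | _neutralize_unknown_sources
-- ===== SOURCE A (Python) =====
-- from typing import Any, List, Optional
--
-- def _neutralize_unknown_sources(text: str, allowed: List[str]) -> (str, List[str]):
--     """
--     Remove simple source-like patterns that are not in the allowed list.
--     Heuristic: remove bracketed chunks like (Regulation XYZ) or [Directive 95/46/EC] unless allowed.
--     """
--     removed: List[str] = []
--     out = []
--     i = 0
--     s = text
--     while i < len(s):
--         ch = s[i]
--         if ch in "([":
--             close = ")" if ch == "(" else "]"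
--             j = s.find(close, i + 1)
--             if j != -1:
--                 chunk = s[i : j + 1]
--                 chunk_low = chunk.lower()
--                 if any(tok in chunk_low for tok in ("act", "regulation", "directive", "code", "article", "section")):
--                     if not any(src.lower() in chunk_low for src in (allowed or [])):
--                         removed.append(chunk)
--                         i = j + 1
--                         continue
--         out.append(ch)
--         i += 1
--     return "".join(out), removed
-- ===== SOURCE B (Python) =====
-- def _neutralize_unknown_sources(text, allowed):
--     """
--     Single pre-pass implementation: precompute the sorted positions of ')' and ']'
--     and the lowercased text/allowed once; find "next close bracket" with a pointer
--     that only moves forward (amortized O(1)) instead of re-scanning with str.find.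
--     """
--     s = text
--     low = s.lower()
--     low_allowed = [a.lower() for a in (allowed or [])]
--     tokens = ("act", "regulation", "directive", "code", "article", "section")
--     close_paren = [k for k, ch in enumerate(s) if ch == ")"]
--     close_brack = [k for k, ch in enumerate(s) if ch == "]"]
--     p = 0  # pointer into close_paren
--     q = 0  # pointer into close_brack
--     out = []
--     removed = []
--     i = 0
--     n = len(s)
--     while i < n:
--         ch = s[i]
--         if ch in "([":
--             if ch == "(":
--                 while p < len(close_paren) and close_paren[p] <= i:
--                     p += 1
--                 j = close_paren[p] if p < len(close_paren) else -1
--             else: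
--                 while q < len(close_brack) and close_brack[q] <= i:
--                     q += 1
--                 j = close_brack[q] if q < len(close_brack) else -1
--             if j != -1:
--                 chunk_low = low[i : j + 1]
--                 if any(t in chunk_low for t in tokens) and not any(a in chunk_low for a in low_allowed):
--                     removed.append(s[i : j + 1])
--                     i = j + 1
--                     continue
--         out.append(ch)
--         i += 1
--     return "".join(out), removed
-- ===== Notes on version B (the rewrite author's own statement) =====
-- stated objective: alternative
-- what changed: Replaces the per-bracket str.find rescans with two precomputed sorted close-bracket position lists walked by forward-only pointers (amortized O(1) per lookup), and lowercases the text and the allowed list once up front instead of per chunk.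
import Mathlib
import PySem

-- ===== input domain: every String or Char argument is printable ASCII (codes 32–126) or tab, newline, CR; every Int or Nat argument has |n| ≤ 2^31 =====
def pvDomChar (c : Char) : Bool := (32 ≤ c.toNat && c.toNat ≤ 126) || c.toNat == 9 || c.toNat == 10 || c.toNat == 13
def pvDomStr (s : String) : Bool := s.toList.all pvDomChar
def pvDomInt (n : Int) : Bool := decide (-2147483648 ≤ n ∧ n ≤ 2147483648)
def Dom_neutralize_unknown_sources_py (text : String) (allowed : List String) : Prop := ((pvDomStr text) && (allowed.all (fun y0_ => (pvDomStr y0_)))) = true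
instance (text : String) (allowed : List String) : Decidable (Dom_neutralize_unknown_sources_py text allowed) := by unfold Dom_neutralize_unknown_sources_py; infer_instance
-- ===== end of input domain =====

-- B replaces A's per-bracket str.find rescans by precomputed close-bracket position
-- lists walked with forward-only pointers, and lowercases text/allowed once (alternative
-- algorithm of similar cost; return values proved equal on all inputs).

-- ===== PORT A =====
-- the tuple of keyword tokens A tests with `any(tok in chunk_low for tok in (...))`
def nusA_tokens : List (List Char) :=
  ["act".toList, "regulation".toList, "directive".toList, "code".toList, "article".toList, "section".toList]

-- A's while-loop: state (i, out, removed); `continue` after a removal jumps to j+1.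
-- Structural recursion on `fuel`, started at s.length (i grows by ≥ 1 per iteration,
-- so the fuel is never exhausted before `i < len(s)` fails).
def nusA_loop (s : List Char) (allowed : List String) (fuel i : Nat) (out : List Char)
    (removed : List String) : List Char × List String :=
  match fuel with
  | 0 => (out, removed)
  | fuel + 1 =>
    if h : i < s.length then
      let ch := s[i]
      if ch = '(' ∨ ch = '[' then
        let close := if ch = '(' then ')' else ']'
        let j := PySem.Chars.findFrom s [close] ((i + 1 : Nat) : Int) none    -- s.find(close, i + 1)
        if hj : j ≠ -1 then
          let chunk := PySem.Chars.slice s (some (i : Int)) (some (j + 1))    -- s[i : j + 1]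
          let chunkLow := PySem.Chars.lower chunk
          if nusA_tokens.any (fun tok => PySem.Chars.isIn tok chunkLow) then
            if !(allowed.any (fun src => PySem.Chars.isIn (PySem.Chars.lower src.toList) chunkLow)) then
              nusA_loop s allowed fuel (j + 1).toNat out (removed ++ [String.ofList chunk])
            else
              nusA_loop s allowed fuel (i + 1) (out ++ [ch]) removed
          else
            nusA_loop s allowed fuel (i + 1) (out ++ [ch]) removed
        else
          nusA_loop s allowed fuel (i + 1) (out ++ [ch]) removed
      else
        nusA_loop s allowed fuel (i + 1) (out ++ [ch]) removed
    else (out, removed)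

def neutralize_unknown_sources_py (text : String) (allowed : List String) : String × List String :=
  let (o, r) := nusA_loop text.toList allowed text.toList.length 0 [] []
  (String.ofList o, r)    -- "".join(out)

-- ===== PORT B =====
-- [k for k, ch in enumerate(s) if ch == c]  (hand port of the comprehension, index carried as k)
def nusB_positions (s : List Char) (c : Char) (k : Nat) : List Nat :=
  match s with
  | [] => []
  | x :: t => if x = c then k :: nusB_positions t c (k + 1) else nusB_positions t c (k + 1)

-- while p < len(P) and P[p] <= i: p += 1   (fuel-counted; called with fuel = len(P))
def nusB_adv (P : List Nat) (fuel p i : Nat) : Nat :=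
  match fuel with
  | 0 => p
  | fuel + 1 =>
    if h : p < P.length then
      if P[p] ≤ i then nusB_adv P fuel (p + 1) i else p
    else p

def nusB_tokens : List (List Char) :=
  ["act".toList, "regulation".toList, "directive".toList, "code".toList, "article".toList, "section".toList]

-- B's while-loop: state (i, p, q, out, removed); p/q are the forward-only pointers.
-- Structural recursion on `fuel`, started at s.length (same reasoning as for A's loop).
def nusB_loop (s low : List Char) (lowAllowed : List (List Char)) (P Q : List Nat)
    (fuel i p q : Nat) (out : List Char) (removed : List String) : List Char × List String :=
  match fuel with
  | 0 => (out, removed)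
  | fuel + 1 =>
    if h : i < s.length then
      let ch := s[i]
      if ch = '(' ∨ ch = '[' then
        if ch = '(' then
          let p' := nusB_adv P P.length p i
          if hp : p' < P.length then
            let j := P[p']
            let chunkLow := PySem.Chars.slice low (some (i : Int)) (some ((j : Int) + 1))    -- low[i : j + 1]
            if nusB_tokens.any (fun tok => PySem.Chars.isIn tok chunkLow) &&
               !(lowAllowed.any (fun a => PySem.Chars.isIn a chunkLow)) then
              nusB_loop s low lowAllowed P Q fuel (j + 1) p' q out
                (removed ++ [String.ofList (PySem.Chars.slice s (some (i : Int)) (some ((j : Int) + 1)))])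
            else
              nusB_loop s low lowAllowed P Q fuel (i + 1) p' q (out ++ [ch]) removed
          else
            nusB_loop s low lowAllowed P Q fuel (i + 1) p' q (out ++ [ch]) removed
        else
          let q' := nusB_adv Q Q.length q i
          if hq : q' < Q.length then
            let j := Q[q']
            let chunkLow := PySem.Chars.slice low (some (i : Int)) (some ((j : Int) + 1))
            if nusB_tokens.any (fun tok => PySem.Chars.isIn tok chunkLow) &&
               !(lowAllowed.any (fun a => PySem.Chars.isIn a chunkLow)) then
              nusB_loop s low lowAllowed P Q fuel (j + 1) p q' out
                (removed ++ [String.ofList (PySem.Chars.slice s (some (i : Int)) (some ((j : Int) + 1)))])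
            else
              nusB_loop s low lowAllowed P Q fuel (i + 1) p q' (out ++ [ch]) removed
          else
            nusB_loop s low lowAllowed P Q fuel (i + 1) p q' (out ++ [ch]) removed
      else
        nusB_loop s low lowAllowed P Q fuel (i + 1) p q (out ++ [ch]) removed
    else (out, removed)

def neutralize_unknown_sources_py_alt (text : String) (allowed : List String) : String × List String :=
  let s := text.toList
  let low := PySem.Chars.lower s                                        -- text.lower()
  let lowAllowed := allowed.map (fun a => PySem.Chars.lower a.toList)   -- [a.lower() for a in allowed]
  let P := nusB_positions s ')' 0
  let Q := nusB_positions s ']' 0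
  let (o, r) := nusB_loop s low lowAllowed P Q s.length 0 0 0 [] []
  (String.ofList o, r)

-- ===== PRECONDITION & SPEC =====
def Spec_neutralize_unknown_sources_py (text : String) (allowed : List String) (out : String × List String) : Prop := out = neutralize_unknown_sources_py_alt text allowed
instance (text : String) (allowed : List String) (out : String × List String) : Decidable (Spec_neutralize_unknown_sources_py text allowed out) := by unfold Spec_neutralize_unknown_sources_py; infer_instance

-- ===== CLAIM (what is proved, stated in full; the proofs are below) =====
def Claim_equal_neutralize_unknown_sources_py : Prop := ∀ (text : String) (allowed : List String), Dom_neutralize_unknown_sources_py text allowed → Spec_neutralize_unknown_sources_py text allowed (neutralize_unknown_sources_py text allowed)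

-- ===== LEMMAS AND PROOFS =====

theorem mem_positions {s : List Char} {c : Char} {k j : Nat} :
    j ∈ nusB_positions s c k ↔ ∃ m, ∃ hm : m < s.length, s[m] = c ∧ j = k + m := by
  induction s generalizing k with
  | nil => simp [nusB_positions]
  | cons x t ih =>
    simp only [nusB_positions]
    constructor
    · intro hmem
      by_cases hx : x = c
      · simp only [if_pos hx, List.mem_cons] at hmem
        rcases hmem with rfl | hmem
        · exact ⟨0, by simp, by simpa using hx, by omega⟩
        · rcases ih.mp hmem with ⟨m, hm, hc, rfl⟩
          exact ⟨m + 1, by simpa using hm, by simpa using hc, by omega⟩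
      · simp only [if_neg hx] at hmem
        rcases ih.mp hmem with ⟨m, hm, hc, rfl⟩
        exact ⟨m + 1, by simpa using hm, by simpa using hc, by omega⟩
    · rintro ⟨m, hm, hc, rfl⟩
      cases m with
      | zero =>
        simp only [List.getElem_cons_zero] at hc
        simp [if_pos hc]
      | succ m =>
        have hmem : k + (m + 1) ∈ nusB_positions t c (k + 1) :=
          ih.mpr ⟨m, by simpa using hm, by simpa using hc, by omega⟩
        by_cases hx : x = c
        · simp only [if_pos hx, List.mem_cons]
          right
          simpa [Nat.add_comm, Nat.add_assoc, Nat.add_left_comm] using hmem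
        · simp only [if_neg hx]
          simpa [Nat.add_comm, Nat.add_assoc, Nat.add_left_comm] using hmem

theorem le_of_mem_positions {s : List Char} {c : Char} {k j : Nat}
    (h : j ∈ nusB_positions s c k) : k ≤ j := by
  rcases mem_positions.mp h with ⟨m, hm, hc, rfl⟩; omega

theorem positions_sorted (s : List Char) (c : Char) (k : Nat) :
    (nusB_positions s c k).Pairwise (· < ·) := by
  induction s generalizing k with
  | nil => simp [nusB_positions]
  | cons x t ih =>
    simp only [nusB_positions]
    split
    · exact List.Pairwise.cons (fun j hj => lt_of_lt_of_le (by omega) (le_of_mem_positions hj)) (ih (k + 1))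
    · exact ih (k + 1)

theorem nusB_adv_stop (P : List Nat) (fuel p i : Nat) (hfu : P.length - p ≤ fuel)
    (h : nusB_adv P fuel p i < P.length) : i < P[nusB_adv P fuel p i] := by
  induction fuel generalizing p with
  | zero => simp only [nusB_adv] at h ⊢; omega
  | succ fuel ih =>
    simp only [nusB_adv] at h ⊢
    split at h
    · rename_i hlt
      split at h
      · rename_i hle
        simp only [dif_pos hlt, if_pos hle] at ⊢
        exact ih (p + 1) (by omega) h
      · rename_i hle
        simp only [dif_pos hlt, if_neg hle]
        omega
    · rename_i hlt; omega

theorem nusB_adv_le_length (P : List Nat) (fuel p i : Nat) (h : p ≤ P.length) :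
    nusB_adv P fuel p i ≤ P.length := by
  induction fuel generalizing p with
  | zero => simpa [nusB_adv] using h
  | succ fuel ih =>
    simp only [nusB_adv]
    split
    · split
      · exact ih (p + 1) (by omega)
      · exact h
    · exact h

theorem nusB_adv_inv (P : List Nat) (fuel p i : Nat)
    (hinv : ∀ m (hm : m < P.length), m < p → P[m] ≤ i) :
    ∀ m (hm : m < P.length), m < nusB_adv P fuel p i → P[m] ≤ i := by
  induction fuel generalizing p with
  | zero => simpa [nusB_adv] using hinv
  | succ fuel ih =>
    simp only [nusB_adv]
    split
    · rename_i hlt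
      split
      · rename_i hle
        refine ih (p + 1) (fun m hm hmp => ?_)
        rcases Nat.lt_or_ge m p with hc | hc
        · exact hinv m hm hc
        · have : m = p := by omega
          subst this; exact hle
      · exact hinv
    · exact hinv

-- the bridge: one advance of the pointer computes exactly s.find(close, i + 1)
theorem findFrom_eq (s : List Char) (c : Char) (i p : Nat) (hi : i < s.length)
    (hp : p ≤ (nusB_positions s c 0).length)
    (hinv : ∀ m (hm : m < (nusB_positions s c 0).length), m < p → (nusB_positions s c 0)[m] ≤ i) :
    PySem.Chars.findFrom s [c] ((i + 1 : Nat) : Int) none =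
      (if h : nusB_adv (nusB_positions s c 0) (nusB_positions s c 0).length p i < (nusB_positions s c 0).length
       then ((nusB_positions s c 0)[nusB_adv (nusB_positions s c 0) (nusB_positions s c 0).length p i] : Int) else -1) := by
  have hk : i + 1 ≤ s.length := hi
  have hainv := nusB_adv_inv (nusB_positions s c 0) (nusB_positions s c 0).length p i hinv
  have hpg := List.pairwise_iff_getElem.mp (positions_sorted s c 0)
  -- c occurs at index m ≥ i+1  ↔  m is a position in the list beyond the pointer
  have hmemP : ∀ m (hm : m < s.length), s[m] = c → m ∈ nusB_positions s c 0 :=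
    fun m hm hc => mem_positions.mpr ⟨m, hm, hc, by omega⟩
  have hsingpre : ∀ (l : List Char), [c] <+: l ↔ l.head? = some c := by
    intro l; cases l <;> simp [List.cons_prefix_iff]
  by_cases ha : nusB_adv (nusB_positions s c 0) (nusB_positions s c 0).length p i < (nusB_positions s c 0).length
  · rw [dif_pos ha]
    set a := nusB_adv (nusB_positions s c 0) (nusB_positions s c 0).length p i with hadef
    set j := (nusB_positions s c 0)[a] with hjdef
    have hjmem : j ∈ nusB_positions s c 0 := List.getElem_mem ha
    obtain ⟨mj, hmj, hcj, hjeq⟩ := mem_positions.mp hjmem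
    have hjlen : j < s.length := by omega
    have hjc : s[j] = c := by
      obtain rfl : mj = j := by omega
      exact hcj
    have hij : i < j := nusB_adv_stop _ _ _ _ (by omega) ha
    -- minimality: no occurrence of c strictly between i and j
    have hmin : ∀ idx, i + 1 ≤ idx → idx < j → ∀ (hidx : idx < s.length), s[idx] ≠ c := by
      intro idx h1 h2 hidx hc
      obtain ⟨m', hm', hm'eq⟩ := List.mem_iff_getElem.mp (hmemP idx hidx hc)
      rcases Nat.lt_or_ge m' a with hlt | hge
      · have := hainv m' hm' hlt; omega
      · rcases Nat.eq_or_lt_of_le hge with rfl | hgt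
        · omega
        · have := hpg a m' ha hm' hgt; omega
    set r := PySem.Chars.findFrom s [c] ((i + 1 : Nat) : Int) with hrdef
    have hrne : r ≠ -1 := by
      intro hr
      have := (PySem.Chars.findFrom_natCast_eq_neg_one_iff s [c] (i + 1) hk).mp hr
      apply this
      rw [List.singleton_infix_iff, List.mem_drop_iff_getElem]
      refine ⟨j - (i + 1), by omega, ?_⟩
      have h : i + 1 + (j - (i + 1)) = j := by omega
      simp only [h]
      exact hjc
    obtain ⟨h1, h2, h3⟩ := PySem.Chars.findFrom_natCast_spec s [c] (i + 1) hk hrne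
    rw [hsingpre, List.head?_drop] at h2
    have hrlen : r.toNat < s.length := (List.getElem?_eq_some_iff.mp h2).1
    have hrc : s[r.toNat] = c := by
      have := (List.getElem?_eq_some_iff.mp h2).2; exact this
    have hrge : i + 1 ≤ r.toNat := by omega
    have hrj : r.toNat = j := by
      rcases Nat.lt_trichotomy r.toNat j with hlt | heq | hgt
      · exact absurd hrc (hmin r.toNat hrge hlt hrlen)
      · exact heq
      · exact absurd ((hsingpre _).mpr (by rw [List.head?_drop]; exact List.getElem?_eq_some_iff.mpr ⟨hjlen, hjc⟩))
          (h3 j (by omega) hgt)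
    omega
  · rw [dif_neg ha]
    have halen : nusB_adv (nusB_positions s c 0) (nusB_positions s c 0).length p i = (nusB_positions s c 0).length := by
      have := nusB_adv_le_length (nusB_positions s c 0) (nusB_positions s c 0).length p i hp; omega
    rw [PySem.Chars.findFrom_natCast_eq_neg_one_iff s [c] (i + 1) hk]
    intro hinf
    rw [List.singleton_infix_iff, List.mem_drop_iff_getElem] at hinf
    obtain ⟨d, hd, hcd⟩ := hinf
    obtain ⟨m', hm', hm'eq⟩ := List.mem_iff_getElem.mp (hmemP (i + 1 + d) (by omega) hcd)
    have := hainv m' hm' (by omega)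
    omega

-- lower commutes with slicing (both are text.lower()[i:j+1] = text[i:j+1].lower())
theorem lower_slice (s : List Char) (a b : Option Int) :
    PySem.Chars.lower (PySem.Chars.slice s a b) = PySem.Chars.slice (PySem.Chars.lower s) a b := by
  simp [PySem.Chars.lower, PySem.Chars.slice, PySem.List.slice, List.map_drop, List.map_take]

theorem loop_eq (s : List Char) (allowed : List String) :
    ∀ fuel i p q out removed,
      p ≤ (nusB_positions s ')' 0).length → q ≤ (nusB_positions s ']' 0).length →
      (∀ m (hm : m < (nusB_positions s ')' 0).length), m < p → (nusB_positions s ')' 0)[m] ≤ i) →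
      (∀ m (hm : m < (nusB_positions s ']' 0).length), m < q → (nusB_positions s ']' 0)[m] ≤ i) →
      nusA_loop s allowed fuel i out removed =
        nusB_loop s (PySem.Chars.lower s) (allowed.map (fun a => PySem.Chars.lower a.toList))
          (nusB_positions s ')' 0) (nusB_positions s ']' 0) fuel i p q out removed := by
  intro fuel
  induction fuel with
  | zero => intro i p q out removed hp hq hP hQ; rfl
  | succ fuel ih =>
    intro i p q out removed hp hq hP hQ
    by_cases hi : i < s.length
    · rw [nusA_loop, nusB_loop, dif_pos hi, dif_pos hi]
      by_cases h1 : s[i] = '('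
      · -- open parenthesis: close = ')'
        have hfe := findFrom_eq s ')' i p hi hp hP
        have hple := nusB_adv_le_length (nusB_positions s ')' 0) (nusB_positions s ')' 0).length p i hp
        have hpinv := nusB_adv_inv (nusB_positions s ')' 0) (nusB_positions s ')' 0).length p i hP
        by_cases ha : nusB_adv (nusB_positions s ')' 0) (nusB_positions s ')' 0).length p i < (nusB_positions s ')' 0).length
        · rw [dif_pos ha] at hfe
          have hastop := nusB_adv_stop (nusB_positions s ')' 0) (nusB_positions s ')' 0).length p i (by omega) ha
          have hane : ((nusB_positions s ')' 0)[nusB_adv (nusB_positions s ')' 0) (nusB_positions s ')' 0).length p i]'ha : Int) ≠ -1 := by omega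
          simp only [h1, hfe, lower_slice, true_or, if_true, ne_eq,
            hane, not_false_eq_true, dite_true, dif_pos ha]
          set jn := (nusB_positions s ')' 0)[nusB_adv (nusB_positions s ')' 0) (nusB_positions s ')' 0).length p i]'ha with hjn
          have htokeq : nusB_tokens = nusA_tokens := rfl
          have hnat : ((jn : Int) + 1).toNat = jn + 1 := by omega
          simp only [htokeq, List.any_map, Function.comp_def, hnat]
          by_cases htok : (nusA_tokens.any fun tok => PySem.Chars.isIn tok
              (PySem.Chars.slice (PySem.Chars.lower s) (some (i : Int)) (some ((jn : Int) + 1)))) = true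
          · by_cases hall : (allowed.any fun src => PySem.Chars.isIn (PySem.Chars.lower src.toList)
                (PySem.Chars.slice (PySem.Chars.lower s) (some (i : Int)) (some ((jn : Int) + 1)))) = true
            · simp only [htok, hall, Bool.not_true, Bool.and_false, if_true]
              exact ih (i + 1) (nusB_adv (nusB_positions s ')' 0) (nusB_positions s ')' 0).length p i) q (out ++ ['(']) removed
                hple hq (fun m hm hmp => by have := hpinv m hm hmp; omega)
                (fun m hm hmq => by have := hQ m hm hmq; omega)
            · simp only [Bool.not_eq_true] at hall
              simp only [htok, hall, Bool.not_false, Bool.and_true, if_true]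
              exact ih (jn + 1) (nusB_adv (nusB_positions s ')' 0) (nusB_positions s ')' 0).length p i) q out
                (removed ++ [String.ofList (PySem.Chars.slice s (some (i : Int)) (some ((jn : Int) + 1)))])
                hple hq (fun m hm hmp => by have := hpinv m hm hmp; omega)
                (fun m hm hmq => by have := hQ m hm hmq; omega)
          · simp only [Bool.not_eq_true] at htok
            simp only [htok, Bool.false_and]
            exact ih (i + 1) (nusB_adv (nusB_positions s ')' 0) (nusB_positions s ')' 0).length p i) q (out ++ ['(']) removed
              hple hq (fun m hm hmp => by have := hpinv m hm hmp; omega)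
              (fun m hm hmq => by have := hQ m hm hmq; omega)
        · rw [dif_neg ha] at hfe
          simp only [h1, hfe, true_or, if_true, ne_eq, not_true, dite_false,
            dif_neg ha]
          exact ih (i + 1) (nusB_adv (nusB_positions s ')' 0) (nusB_positions s ')' 0).length p i) q (out ++ ['(']) removed
            hple hq (fun m hm hmp => by have := hpinv m hm hmp; omega)
            (fun m hm hmq => by have := hQ m hm hmq; omega)
      · by_cases h2 : s[i] = '['
        · -- open square bracket: close = ']'
          have hfe := findFrom_eq s ']' i q hi hq hQ
          have hqle := nusB_adv_le_length (nusB_positions s ']' 0) (nusB_positions s ']' 0).length q i hq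
          have hqinv := nusB_adv_inv (nusB_positions s ']' 0) (nusB_positions s ']' 0).length q i hQ
          by_cases ha : nusB_adv (nusB_positions s ']' 0) (nusB_positions s ']' 0).length q i < (nusB_positions s ']' 0).length
          · rw [dif_pos ha] at hfe
            have hastop := nusB_adv_stop (nusB_positions s ']' 0) (nusB_positions s ']' 0).length q i (by omega) ha
            have hane : ((nusB_positions s ']' 0)[nusB_adv (nusB_positions s ']' 0) (nusB_positions s ']' 0).length q i]'ha : Int) ≠ -1 := by omega
            simp only [h2, hfe, lower_slice, Char.reduceEq, or_true, if_true,
              ne_eq, hane, not_false_eq_true,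
              dite_true, dif_pos ha, if_false]
            set jn := (nusB_positions s ']' 0)[nusB_adv (nusB_positions s ']' 0) (nusB_positions s ']' 0).length q i]'ha with hjn
            have htokeq : nusB_tokens = nusA_tokens := rfl
            have hnat : ((jn : Int) + 1).toNat = jn + 1 := by omega
            simp only [htokeq, List.any_map, Function.comp_def, hnat]
            by_cases htok : (nusA_tokens.any fun tok => PySem.Chars.isIn tok
                (PySem.Chars.slice (PySem.Chars.lower s) (some (i : Int)) (some ((jn : Int) + 1)))) = true
            · by_cases hall : (allowed.any fun src => PySem.Chars.isIn (PySem.Chars.lower src.toList)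
                  (PySem.Chars.slice (PySem.Chars.lower s) (some (i : Int)) (some ((jn : Int) + 1)))) = true
              · simp only [htok, hall, Bool.not_true, Bool.and_false, if_true]
                exact ih (i + 1) p (nusB_adv (nusB_positions s ']' 0) (nusB_positions s ']' 0).length q i) (out ++ ['[']) removed
                  hp hqle (fun m hm hmp => by have := hP m hm hmp; omega)
                  (fun m hm hmq => by have := hqinv m hm hmq; omega)
              · simp only [Bool.not_eq_true] at hall
                simp only [htok, hall, Bool.not_false, Bool.and_true, if_true]
                exact ih (jn + 1) p (nusB_adv (nusB_positions s ']' 0) (nusB_positions s ']' 0).length q i) out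
                  (removed ++ [String.ofList (PySem.Chars.slice s (some (i : Int)) (some ((jn : Int) + 1)))])
                  hp hqle (fun m hm hmp => by have := hP m hm hmp; omega)
                  (fun m hm hmq => by have := hqinv m hm hmq; omega)
            · simp only [Bool.not_eq_true] at htok
              simp only [htok, Bool.false_and]
              exact ih (i + 1) p (nusB_adv (nusB_positions s ']' 0) (nusB_positions s ']' 0).length q i) (out ++ ['[']) removed
                hp hqle (fun m hm hmp => by have := hP m hm hmp; omega)
                (fun m hm hmq => by have := hqinv m hm hmq; omega)
          · rw [dif_neg ha] at hfe
            simp only [h2, hfe, Char.reduceEq, or_true, if_true, ne_eq,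
              not_true, dite_false, dif_neg ha, if_false]
            exact ih (i + 1) p (nusB_adv (nusB_positions s ']' 0) (nusB_positions s ']' 0).length q i) (out ++ ['[']) removed
              hp hqle (fun m hm hmp => by have := hP m hm hmp; omega)
              (fun m hm hmq => by have := hqinv m hm hmq; omega)
        · -- ordinary character
          simp only [if_neg (not_or.mpr ⟨h1, h2⟩)]
          exact ih (i + 1) p q (out ++ [s[i]]) removed hp hq
            (fun m hm hmp => by have := hP m hm hmp; omega)
            (fun m hm hmq => by have := hQ m hm hmq; omega)
    · rw [nusA_loop, nusB_loop, dif_neg hi, dif_neg hi]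

-- ===== VERDICT (by name: the statement is the Claim_ definition above) =====
theorem neutralize_unknown_sources_py_spec : Claim_equal_neutralize_unknown_sources_py := by
  intro text allowed _
  unfold Spec_neutralize_unknown_sources_py
  unfold neutralize_unknown_sources_py neutralize_unknown_sources_py_alt
  rw [loop_eq text.toList allowed text.toList.length 0 0 0 [] [] (by omega) (by omega)
    (by omega) (by omega)]
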